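-- pv_equiv track=rewrite | github.com/newbieski/python_study | B24503.py | f
-- ===== SOURCE A (Python) =====
-- def f(a, b) :
--     res = 0
--     while b > 0 :
--         res += a
--         i = res
--         while i % a == 0 :
--             b -= 1
--             i //= a
--     return res
-- ===== SOURCE B (Python) =====
-- def f(a, b):
--     # Binary search on K for res = a*K, using the closed-form count
--     # sum_{k=1..n} (1 + v_|a|(k)) = n + sum_{i>=1} n // |a|^i.
--     if b <= 0:
--         return 0
--     m = abs(a)
--
--     def count(n):
--         t, p = n, m
--         while p <= n:
--             t += n // p
--             p *= m
--         return t
--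
--     lo, hi = 1, b
--     while lo < hi:
--         mid = (lo + hi) // 2
--         if count(mid) >= b:
--             hi = mid
--         else:
--             lo = mid + 1
--     return a * lo
-- ===== Notes on version B (the rewrite author's own statement) =====
-- stated objective: faster
-- what changed: Replaces A's linear simulation (O(b) outer iterations, decrementing b by the a-adic valuation at each multiple of a) by a binary search over the answer index using the closed-form count n + sum_i n//|a|^i of valuation steps up to n.
import Mathlib
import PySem

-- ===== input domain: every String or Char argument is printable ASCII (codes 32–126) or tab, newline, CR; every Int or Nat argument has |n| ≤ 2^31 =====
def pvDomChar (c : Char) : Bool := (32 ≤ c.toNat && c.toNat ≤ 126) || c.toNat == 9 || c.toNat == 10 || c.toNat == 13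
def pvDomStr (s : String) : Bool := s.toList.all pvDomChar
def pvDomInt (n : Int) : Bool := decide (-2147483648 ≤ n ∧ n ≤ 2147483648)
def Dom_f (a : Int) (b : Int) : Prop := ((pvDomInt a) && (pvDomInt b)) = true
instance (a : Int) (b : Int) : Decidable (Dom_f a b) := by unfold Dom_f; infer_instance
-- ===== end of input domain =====

-- B replaces A's linear simulation by a binary search on the answer index using the
-- closed-form count n + Σᵢ n//|a|^i (objective: faster, asymptotic).

-- ===== PORT A =====
-- inner `while i % a == 0` loop; fuel makes it total (enough fuel is supplied at the call site)
def pvInnerA (fuel : Nat) (a : Int) (b : Int) (i : Int) : Int × Int :=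
  match fuel with
  | 0 => (b, i)
  | fuel + 1 =>
    if PySem.Int.mod i a = 0 then pvInnerA fuel a (b - 1) (PySem.Int.floordiv i a)
    else (b, i)

-- outer `while b > 0` loop; b decreases by ≥ 1 per iteration, so b.toNat fuel suffices
def pvOuterA (fuel : Nat) (a : Int) (res : Int) (b : Int) : Int :=
  match fuel with
  | 0 => res
  | fuel + 1 =>
    if 0 < b then
      let res' := res + a
      pvOuterA fuel a res' (pvInnerA (res'.natAbs + 1) a b res').1
    else res

def f (a : Int) (b : Int) : Int := pvOuterA b.toNat a 0 b

-- ===== PORT B =====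
-- `while p <= n: t += n // p; p *= m` of Source B's count(); the `2 ≤ m ∧ 1 ≤ p` part of the
-- guard only makes the recursion total — on Pre_ inputs it always holds (p starts at m = |a| ≥ 2)
def pvCount (m : Int) (n : Int) (t : Int) (p : Int) : Int :=
  if h : 2 ≤ m ∧ 1 ≤ p ∧ p ≤ n then pvCount m n (t + PySem.Int.floordiv n p) (p * m)
  else t
termination_by (n + 1 - p).toNat
decreasing_by
  have h2 : p * 2 ≤ p * m := mul_le_mul_of_nonneg_left h.1 (by omega)
  omega

-- `while lo < hi: mid = (lo+hi)//2; …` of Source B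
def pvBsearch (m : Int) (b : Int) (lo : Int) (hi : Int) : Int :=
  if h : lo < hi then
    let mid := PySem.Int.floordiv (lo + hi) 2
    if b ≤ pvCount m mid mid m then pvBsearch m b lo mid
    else pvBsearch m b (mid + 1) hi
  else lo
termination_by (hi - lo).toNat
decreasing_by
  · have hb := PySem.Int.floordiv_two_mid_bounds (le_of_lt h)
    have hlt : PySem.Int.floordiv (lo + hi) 2 < hi :=
      (PySem.Int.floordiv_lt_iff_lt_mul (by omega)).mpr (by omega)
    omega
  · have hb := PySem.Int.floordiv_two_mid_bounds (le_of_lt h)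
    omega

def f_alt (a : Int) (b : Int) : Int :=
  if b ≤ 0 then 0
  else
    let m := |a|
    a * pvBsearch m b 1 b

-- ===== PRECONDITION & SPEC =====
-- Pre_ excludes exactly the inputs on which A never returns: for b > 0 and a = 0 the inner
-- `i % a` raises ZeroDivisionError, and for b > 0 and |a| = 1 the inner loop never terminates
-- (B raises / diverges on those same inputs).
def Pre_f (a : Int) (b : Int) : Prop := 0 < b → 2 ≤ a.natAbs
instance (a : Int) (b : Int) : Decidable (Pre_f a b) := by unfold Pre_f; infer_instance
def pvWitness_f : Int × Int := (3, 5)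

def Spec_f (a : Int) (b : Int) (out : Int) : Prop := out = f_alt a b
instance (a : Int) (b : Int) (out : Int) : Decidable (Spec_f a b out) := by unfold Spec_f; infer_instance

-- ===== CLAIM (what is proved, stated in full; the proofs are below) =====
def Claim_equal_f : Prop := ∀ (a : Int) (b : Int), Dom_f a b → Pre_f a b → Spec_f a b (f a b)

-- ===== LEMMAS AND PROOFS =====

-- ν m k = number of times m divides k (the |a|-adic valuation; 0 for k = 0 or m < 2)
def pvNu (m : Nat) (k : Nat) : Nat :=
  if h : 2 ≤ m ∧ 0 < k ∧ m ∣ k then pvNu m (k / m) + 1 else 0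
termination_by k
decreasing_by exact Nat.div_lt_self h.2.1 (by omega)

-- cnt m n = Σ_{K=1..n} (ν m K + 1) = total number of decrements of b after A has processed K = 1..n
def pvCnt (m : Nat) : Nat → Nat
  | 0 => 0
  | n + 1 => pvCnt m n + pvNu m (n + 1) + 1

-- chain m p k = number of i ≥ 0 with p·mⁱ ∣ k (guarded recursion on growing p)
def pvChain (m : Nat) (p : Nat) (k : Nat) : Nat :=
  if h : 2 ≤ m ∧ 1 ≤ p ∧ p ≤ k ∧ p ∣ k then pvChain m (p * m) k + 1 else 0
termination_by k + 1 - p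
decreasing_by
  have h2 : p * 2 ≤ p * m := Nat.mul_le_mul_left p h.1
  omega

-- geo m n p = Σ_{i≥0, p·mⁱ ≤ n} n / (p·mⁱ)  (the Nat shadow of Source B's count loop)
def pvGeo (m : Nat) (n : Nat) (p : Nat) : Nat :=
  if h : 2 ≤ m ∧ 1 ≤ p ∧ p ≤ n then n / p + pvGeo m n (p * m) else 0
termination_by n + 1 - p
decreasing_by
  have h2 : p * 2 ≤ p * m := Nat.mul_le_mul_left p h.1
  omega

-- linear search: the index A stops at, as a recursive function (reference semantics of A's outer loop)
def pvSearch (m : Nat) (b : Int) (K : Nat) : Nat :=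
  if h : 0 < b then pvSearch m (b - (↑(pvNu m (K + 1)) + 1)) (K + 1) else K
termination_by b.toNat
decreasing_by
  have : (0:Int) ≤ ↑(pvNu m (K + 1)) := Int.natCast_nonneg _
  omega

lemma pvNu_le (m : Nat) : ∀ k, pvNu m k ≤ k := by
  intro k
  induction k using Nat.strong_induction_on with
  | _ k ih =>
    rw [pvNu]
    split
    · rename_i h
      have hlt : k / m < k := Nat.div_lt_self h.2.1 (by omega)
      have := ih (k / m) hlt
      omega
    · omega

lemma pvCnt_mono (m : Nat) : ∀ {j k : Nat}, j ≤ k → pvCnt m j ≤ pvCnt m k := by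
  intro j k h
  induction k with
  | zero =>
    have hj : j = 0 := by omega
    subst hj; exact le_refl _
  | succ k ih =>
    rcases Nat.eq_or_lt_of_le h with he | hl
    · exact le_of_eq (by rw [he])
    · have h1 := ih (by omega)
      have h2 : pvCnt m (k + 1) = pvCnt m k + pvNu m (k + 1) + 1 := rfl
      omega

lemma le_pvCnt (m : Nat) : ∀ n, n ≤ pvCnt m n := by
  intro n
  induction n with
  | zero => exact Nat.zero_le _
  | succ n ih =>
    have h2 : pvCnt m (n + 1) = pvCnt m n + pvNu m (n + 1) + 1 := rfl
    omega

lemma pvChain_scale (m : Nat) (hm : 2 ≤ m) :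
    ∀ F p k, k + 1 - p ≤ F → 1 ≤ p → m ∣ k → pvChain m (p * m) k = pvChain m p (k / m) := by
  intro F
  induction F with
  | zero =>
    intro p k hF hp hdvd
    have hkm : k / m ≤ k := Nat.div_le_self _ _
    have h2 : p * 2 ≤ p * m := Nat.mul_le_mul_left p hm
    have hL : pvChain m (p * m) k = 0 := by
      rw [pvChain]; exact dif_neg (fun hc => absurd hc.2.2.1 (by omega))
    have hR : pvChain m p (k / m) = 0 := by
      rw [pvChain]; exact dif_neg (fun hc => absurd hc.2.2.1 (by omega))
    rw [hL, hR]
  | succ F ih =>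
    intro p k hF hp hdvd
    have hm0 : 0 < m := by omega
    have hiff : (p * m ≤ k ∧ p * m ∣ k) ↔ (p ≤ k / m ∧ p ∣ k / m) := by
      constructor
      · rintro ⟨h1, h2⟩
        exact ⟨(Nat.le_div_iff_mul_le hm0).mpr h1,
          (Nat.dvd_div_iff_mul_dvd hdvd).mpr (by rwa [Nat.mul_comm])⟩
      · rintro ⟨h1, h2⟩
        exact ⟨(Nat.le_div_iff_mul_le hm0).mp h1,
          by have := (Nat.dvd_div_iff_mul_dvd hdvd).mp h2; rwa [Nat.mul_comm] at this⟩
    have h2 : p * 2 ≤ p * m := Nat.mul_le_mul_left p hm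
    by_cases hc : p * m ≤ k ∧ p * m ∣ k
    · have hc' := hiff.mp hc
      have hL : pvChain m (p * m) k = pvChain m (p * m * m) k + 1 := by
        rw [pvChain]; exact dif_pos ⟨hm, by omega, hc.1, hc.2⟩
      have hR : pvChain m p (k / m) = pvChain m (p * m) (k / m) + 1 := by
        rw [pvChain]; exact dif_pos ⟨hm, hp, hc'.1, hc'.2⟩
      rw [hL, hR, ih (p * m) k (by omega) (by omega) hdvd]
    · have hc' : ¬ (p ≤ k / m ∧ p ∣ k / m) := fun h => hc (hiff.mpr h)
      have hL : pvChain m (p * m) k = 0 := by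
        rw [pvChain]; exact dif_neg (by tauto)
      have hR : pvChain m p (k / m) = 0 := by
        rw [pvChain]; exact dif_neg (by tauto)
      rw [hL, hR]

lemma pvNu_eq_pvChain (m : Nat) (hm : 2 ≤ m) : ∀ k, pvNu m k = pvChain m m k := by
  intro k
  induction k using Nat.strong_induction_on with
  | _ k ih =>
    by_cases hc : 0 < k ∧ m ∣ k
    · have hle : m ≤ k := Nat.le_of_dvd hc.1 hc.2
      have hL : pvNu m k = pvNu m (k / m) + 1 := by
        rw [pvNu]; exact dif_pos ⟨hm, hc.1, hc.2⟩
      have hR : pvChain m m k = pvChain m (m * m) k + 1 := by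
        rw [pvChain]; exact dif_pos ⟨hm, by omega, hle, hc.2⟩
      have hlt : k / m < k := Nat.div_lt_self hc.1 (by omega)
      rw [hL, hR, ih (k / m) hlt,
        ← pvChain_scale m hm (k + 1) m k (by omega) (by omega) hc.2]
    · have hL : pvNu m k = 0 := by
        rw [pvNu]; exact dif_neg (by tauto)
      have hR : pvChain m m k = 0 := by
        rw [pvChain]
        refine dif_neg ?_
        rcases Nat.eq_zero_or_pos k with h0 | h0
        · subst h0; intro h; exact absurd h.2.2.1 (by omega)
        · intro h; exact hc ⟨h0, h.2.2.2⟩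
      rw [hL, hR]

lemma pvGeo_succ (m : Nat) (hm : 2 ≤ m) :
    ∀ F p n, n + 2 - p ≤ F → 1 ≤ p → pvGeo m (n + 1) p = pvGeo m n p + pvChain m p (n + 1) := by
  intro F
  induction F with
  | zero =>
    intro p n hF hp
    have hA : pvGeo m (n + 1) p = 0 := by
      rw [pvGeo]; exact dif_neg (fun hc => absurd hc.2.2 (by omega))
    have hB : pvGeo m n p = 0 := by
      rw [pvGeo]; exact dif_neg (fun hc => absurd hc.2.2 (by omega))
    have hC : pvChain m p (n + 1) = 0 := by
      rw [pvChain]; exact dif_neg (fun hc => absurd hc.2.2.1 (by omega))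
    rw [hA, hB, hC]
  | succ F ih =>
    intro p n hF hp
    have h2 : p * 2 ≤ p * m := Nat.mul_le_mul_left p hm
    by_cases h1 : p ≤ n + 1
    · have hA : pvGeo m (n + 1) p = (n + 1) / p + pvGeo m (n + 1) (p * m) := by
        rw [pvGeo]; exact dif_pos ⟨hm, hp, h1⟩
      rw [hA, ih (p * m) n (by omega) (by omega)]
      by_cases hd : p ∣ n + 1
      · have hC : pvChain m p (n + 1) = pvChain m (p * m) (n + 1) + 1 := by
          rw [pvChain]; exact dif_pos ⟨hm, hp, h1, hd⟩
        have hdiv : (n + 1) / p = n / p + 1 := by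
          rw [Nat.succ_div, if_pos hd]
        by_cases hn : p ≤ n
        · have hB : pvGeo m n p = n / p + pvGeo m n (p * m) := by
            rw [pvGeo]; exact dif_pos ⟨hm, hp, hn⟩
          rw [hB, hC]; omega
        · have hpn : p = n + 1 := by omega
          have hB : pvGeo m n p = 0 := by
            rw [pvGeo]; exact dif_neg (fun hc => absurd hc.2.2 (by omega))
          have hg0 : pvGeo m n (p * m) = 0 := by
            rw [pvGeo]; exact dif_neg (fun hc => absurd hc.2.2 (by omega))
          have hc0 : pvChain m (p * m) (n + 1) = 0 := by
            rw [pvChain]; exact dif_neg (fun hc => absurd hc.2.2.1 (by omega))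
          have hdp : (n + 1) / p = 1 := by rw [hpn, Nat.div_self (by omega)]
          have hnp : n / p = 0 := Nat.div_eq_of_lt (by omega)
          rw [hB, hC, hg0, hc0]; omega
      · have hC : pvChain m p (n + 1) = 0 := by
          rw [pvChain]; exact dif_neg (fun hc => hd hc.2.2.2)
        have hc0 : pvChain m (p * m) (n + 1) = 0 := by
          rw [pvChain]
          exact dif_neg (fun hc => hd ((dvd_mul_right p m).trans hc.2.2.2))
        have hdiv : (n + 1) / p = n / p := by
          rw [Nat.succ_div, if_neg hd]; omega
        have hn : p ≤ n := by
          rcases Nat.lt_or_ge n p with h' | h'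
          · exfalso
            have : p = n + 1 := by omega
            exact hd (by rw [this])
          · exact h'
        have hB : pvGeo m n p = n / p + pvGeo m n (p * m) := by
          rw [pvGeo]; exact dif_pos ⟨hm, hp, hn⟩
        rw [hB, hC, hc0]; omega
    · have hA : pvGeo m (n + 1) p = 0 := by
        rw [pvGeo]; exact dif_neg (fun hc => absurd hc.2.2 (by omega))
      have hB : pvGeo m n p = 0 := by
        rw [pvGeo]; exact dif_neg (fun hc => absurd hc.2.2 (by omega))
      have hC : pvChain m p (n + 1) = 0 := by
        rw [pvChain]; exact dif_neg (fun hc => absurd hc.2.2.1 (by omega))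
      rw [hA, hB, hC]

lemma pvCnt_eq_pvGeo (m : Nat) (hm : 2 ≤ m) : ∀ n, pvCnt m n = n + pvGeo m n m := by
  intro n
  induction n with
  | zero =>
    have : pvGeo m 0 m = 0 := by rw [pvGeo]; rw [dif_neg (by omega)]
    simp [pvCnt, this]
  | succ n ih =>
    have hg := pvGeo_succ m hm (n + 2) m n (by omega) (by omega)
    have hc := pvNu_eq_pvChain m hm (n + 1)
    simp only [pvCnt]
    omega

-- bridge: the Int-valued port loop computes the Nat geometric sum
lemma pvCount_eq_pvGeo :
    ∀ F (m n p : Nat) (t : Int), n + 1 - p ≤ F → 2 ≤ m → 1 ≤ p →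
      pvCount (↑m) (↑n) t (↑p) = t + ↑(pvGeo m n p) := by
  intro F
  induction F with
  | zero =>
    intro m n p t hF hm hp
    rw [pvCount, pvGeo]
    rw [dif_neg (by omega), dif_neg (by omega)]
    simp
  | succ F ih =>
    intro m n p t hF hm hp
    have h2 : p * 2 ≤ p * m := Nat.mul_le_mul_left p hm
    rw [pvCount, pvGeo]
    by_cases h1 : p ≤ n
    · rw [dif_pos (by omega), dif_pos ⟨hm, hp, h1⟩]
      have hfd : PySem.Int.floordiv (↑n) (↑p) = ((n / p : Nat) : Int) :=
        PySem.Int.floordiv_natCast n p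
      have hpm : ((p : Int)) * (↑m) = ((p * m : Nat) : Int) := by push_cast; ring
      rw [hfd, hpm, ih m n (p * m) _ (by omega) hm (by omega)]
      push_cast; ring
    · rw [dif_neg (by omega), dif_neg (by omega)]
      simp

-- characterisation of A's stopping index: pvSearch m b 0 is the least n with b ≤ cnt m n
lemma pvSearch_spec (m : Nat) :
    ∀ F (b : Int) (K : Nat), b.toNat ≤ F → 0 < b →
      ((↑(pvCnt m K) + b ≤ ↑(pvCnt m (pvSearch m b K))) ∧
       (∀ j : Nat, K ≤ j → j < pvSearch m b K → (↑(pvCnt m j) : Int) < ↑(pvCnt m K) + b)) := by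
  intro F
  induction F with
  | zero => intro b K hF hb; omega
  | succ F ih =>
    intro b K hF hb
    rw [pvSearch, dif_pos hb]
    set b' : Int := b - (↑(pvNu m (K + 1)) + 1) with hb'
    have hcnt : pvCnt m (K + 1) = pvCnt m K + pvNu m (K + 1) + 1 := rfl
    by_cases hpos : 0 < b'
    · obtain ⟨H1, H2⟩ := ih b' (K + 1) (by omega) hpos
      constructor
      · have : (↑(pvCnt m (K + 1)) : Int) = ↑(pvCnt m K) + ↑(pvNu m (K + 1)) + 1 := by
          rw [hcnt]; push_cast; ring
        omega
      · intro j hKj hjN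
        rcases Nat.eq_or_lt_of_le hKj with h | h
        · subst h; omega
        · have := H2 j (by omega) hjN
          have hc : (↑(pvCnt m (K + 1)) : Int) = ↑(pvCnt m K) + ↑(pvNu m (K + 1)) + 1 := by
            rw [hcnt]; push_cast; ring
          omega
    · rw [pvSearch, dif_neg hpos]
      constructor
      · have : (↑(pvCnt m (K + 1)) : Int) = ↑(pvCnt m K) + ↑(pvNu m (K + 1)) + 1 := by
          rw [hcnt]; push_cast; ring
        omega
      · intro j hKj hjN
        have : j = K := by omega
        subst this; omega

-- binary search returns the same least index
lemma pvBsearch_eq (m : Nat) (hm : 2 ≤ m) (b : Int) (N : Nat)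
    (H1 : b ≤ ↑(pvCnt m N)) (H2 : ∀ j : Nat, j < N → (↑(pvCnt m j) : Int) < b) :
    ∀ d (lo hi : Int), (hi - lo).toNat ≤ d → 1 ≤ lo → lo ≤ ↑N → ↑N ≤ hi →
      pvBsearch (↑m) b lo hi = ↑N := by
  intro d
  induction d with
  | zero =>
    intro lo hi hd h1 hloN hNhi
    rw [pvBsearch, dif_neg (by omega)]
    omega
  | succ d ih =>
    intro lo hi hd h1 hloN hNhi
    rw [pvBsearch]
    by_cases hlt : lo < hi
    · rw [dif_pos hlt]
      have hmid := PySem.Int.floordiv_two_mid_bounds (le_of_lt hlt)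
      have hmidlt : PySem.Int.floordiv (lo + hi) 2 < hi :=
        (PySem.Int.floordiv_lt_iff_lt_mul (by omega)).mpr (by omega)
      set mid := PySem.Int.floordiv (lo + hi) 2 with hmiddef
      have hmid1 : 1 ≤ mid := by omega
      obtain ⟨nm, hnm⟩ : ∃ nm : Nat, mid = (↑nm : Int) := ⟨mid.toNat, by omega⟩
      have hcnt : pvCount (↑m) mid mid (↑m) = ↑(pvCnt m nm) := by
        rw [hnm, pvCount_eq_pvGeo (nm + 1) m nm m (↑nm) (by omega) hm (by omega),
          pvCnt_eq_pvGeo m hm nm]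
        push_cast; ring
      by_cases hcond : b ≤ pvCount (↑m) mid mid (↑m)
      · rw [if_pos hcond]
        -- N ≤ mid: otherwise minimality gives cnt mid < b
        have hNmid : (↑N : Int) ≤ mid := by
          by_contra hcon
          have hlt2 : nm < N := by omega
          have := H2 nm hlt2
          rw [hcnt] at hcond
          omega
        exact ih lo mid (by omega) h1 hloN hNmid
      · rw [if_neg hcond]
        -- mid < N: otherwise monotonicity gives b ≤ cnt mid
        have hmidN : mid < (↑N : Int) := by
          by_contra hcon
          have hle : N ≤ nm := by omega
          have hmono := pvCnt_mono m hle
          rw [hcnt] at hcond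
          omega
        exact ih (mid + 1) hi (by omega) (by omega) (by omega) hNhi
    · rw [dif_neg hlt]
      omega

-- A's inner loop decrements b by exactly ν |a| |i| (b-component only)
lemma pvInnerA_fst : ∀ fuel (a b j : Int), 2 ≤ a.natAbs → j ≠ 0 →
    pvNu a.natAbs j.natAbs ≤ fuel → (pvInnerA fuel a b j).1 = b - ↑(pvNu a.natAbs j.natAbs) := by
  intro fuel
  induction fuel with
  | zero =>
    intro a b j hm hj hnu
    have : pvNu a.natAbs j.natAbs = 0 := by omega
    simp [pvInnerA, this]
  | succ fuel ih =>
    intro a b j hm hj hnu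
    simp only [pvInnerA]
    have ha0 : a ≠ 0 := by
      intro h; rw [h] at hm; simp at hm
    by_cases hdvd : a ∣ j
    · rw [if_pos ((PySem.Int.mod_eq_zero_iff_dvd j a).mpr hdvd)]
      -- floordiv is the exact quotient
      have hmod : PySem.Int.mod j a = 0 := (PySem.Int.mod_eq_zero_iff_dvd j a).mpr hdvd
      have hq : PySem.Int.floordiv j a * a = j := by
        have := PySem.Int.floordiv_mul_add_mod j a
        omega
      set q := PySem.Int.floordiv j a with hqdef
      have hq0 : q ≠ 0 := by
        intro h; rw [h] at hq; simp at hq; exact hj hq.symm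
      have hqn : q.natAbs * a.natAbs = j.natAbs := by
        rw [← Int.natAbs_mul, hq]
      have hqdiv : j.natAbs / a.natAbs = q.natAbs := by
        rw [← hqn, Nat.mul_div_cancel _ (by omega)]
      have hnudvd : a.natAbs ∣ j.natAbs := Int.natAbs_dvd_natAbs.mpr hdvd
      have hj0 : 0 < j.natAbs := by
        rcases Int.natAbs_eq_zero.mp.mt hj with h
        omega
      have hnueq : pvNu a.natAbs j.natAbs = pvNu a.natAbs q.natAbs + 1 := by
        rw [pvNu, dif_pos ⟨hm, hj0, hnudvd⟩, hqdiv]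
      rw [ih a (b - 1) q hm hq0 (by omega)]
      rw [hnueq]; push_cast; ring
    · rw [if_neg ?_]
      · have hnu0 : pvNu a.natAbs j.natAbs = 0 := by
          rw [pvNu, dif_neg ?_]
          intro h
          exact hdvd (Int.natAbs_dvd_natAbs.mp h.2.2)
        simp [hnu0]
      · intro h
        exact hdvd ((PySem.Int.mod_eq_zero_iff_dvd j a).mp h)

-- A's outer loop is the linear search pvSearch
lemma pvOuterA_eq : ∀ fuel (a b : Int) (K : Nat), 2 ≤ a.natAbs → b.toNat ≤ fuel →
    pvOuterA fuel a (a * ↑K) b = a * ↑(pvSearch a.natAbs b K) := by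
  intro fuel
  induction fuel with
  | zero =>
    intro a b K hm hF
    have hb : ¬ (0 < b) := by omega
    rw [pvSearch, dif_neg hb]
    simp [pvOuterA]
  | succ fuel ih =>
    intro a b K hm hF
    simp only [pvOuterA]
    by_cases hb : 0 < b
    · rw [if_pos hb]
      have ha0 : a ≠ 0 := by intro h; rw [h] at hm; simp at hm
      have hres : a * ↑K + a = a * ↑(K + 1) := by push_cast; ring
      have hres0 : a * ((K + 1 : Nat) : Int) ≠ 0 :=
        mul_ne_zero ha0 (by positivity)
      have habs : (a * ((K + 1 : Nat) : Int)).natAbs = a.natAbs * (K + 1) := by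
        simp [Int.natAbs_mul]; omega
      have hnueq : pvNu a.natAbs (a * ((K + 1 : Nat) : Int)).natAbs = pvNu a.natAbs (K + 1) + 1 := by
        rw [habs, pvNu, dif_pos ⟨hm, by positivity, Dvd.intro _ rfl⟩,
          Nat.mul_div_cancel_left _ (by omega)]
      have hnule := pvNu_le a.natAbs (a * ((K + 1 : Nat) : Int)).natAbs
      have hinner := pvInnerA_fst ((a * ((K + 1 : Nat) : Int)).natAbs + 1) a b
        (a * ((K + 1 : Nat) : Int)) hm hres0 (by omega)
      rw [hres, hinner, hnueq]
      have harg : b - (↑(pvNu a.natAbs (K + 1) + 1) : Int)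
          = b - (↑(pvNu a.natAbs (K + 1)) + 1) := by push_cast; ring
      rw [harg]
      have hb' : (b - (↑(pvNu a.natAbs (K + 1)) + 1)).toNat ≤ fuel := by
        have : (0:Int) ≤ ↑(pvNu a.natAbs (K + 1)) := Int.natCast_nonneg _
        omega
      rw [ih a _ (K + 1) hm hb']
      conv_rhs => rw [pvSearch]
      rw [dif_pos hb]
    · rw [if_neg hb, pvSearch, dif_neg hb]

-- ===== VERDICT (by name: the statement is the Claim_ definition above) =====
theorem f_spec : Claim_equal_f := by
  intro a b _ hpre
  unfold Spec_f f f_alt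
  by_cases hb : b ≤ 0
  · have : b.toNat = 0 := by omega
    rw [this, if_pos hb]
    simp [pvOuterA]
  · have hbpos : 0 < b := by omega
    have hm : 2 ≤ a.natAbs := hpre hbpos
    rw [if_neg hb]
    set m := a.natAbs with hmdef
    -- A side
    have hA : pvOuterA b.toNat a 0 b = a * ↑(pvSearch m b 0) := by
      have := pvOuterA_eq b.toNat a b 0 hm (le_refl _)
      simpa using this
    rw [hA]
    -- characterisation of N
    obtain ⟨H1, H2⟩ := pvSearch_spec m b.toNat b 0 (le_refl _) hbpos
    have hcnt0 : pvCnt m 0 = 0 := rfl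
    rw [hcnt0] at H1 H2
    simp only [Nat.cast_zero, zero_add] at H1 H2
    set N := pvSearch m b 0 with hN
    have H2' : ∀ j : Nat, j < N → (↑(pvCnt m j) : Int) < b := fun j hj => H2 j (Nat.zero_le _) hj
    -- B side: |a| = ↑m
    have habs : |a| = (↑m : Int) := by rw [hmdef]; exact Int.abs_eq_natAbs a
    have hN1 : 1 ≤ (↑N : Int) := by
      rcases Nat.eq_zero_or_pos N with h0 | h0
      · exfalso; rw [h0, hcnt0] at H1; simp at H1; omega
      · exact_mod_cast h0
    have hNb : (↑N : Int) ≤ b := by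
      by_contra hcon
      have hlt : b.toNat < N := by omega
      have := H2' b.toNat hlt
      have hle := le_pvCnt m b.toNat
      omega
    have hB := pvBsearch_eq m hm b N H1 H2' (b - 1).toNat 1 b (by omega) (by omega) hN1
      (by omega)
    show a * (↑N : Int) = a * pvBsearch |a| b 1 b
    rw [habs, hB]
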